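-- pv_equiv track=rewrite | github.com/irmedvedeva/PyRTKAI | src/pyrtkai/shell_parse.py | find_heredoc_marker_outside_quotes
-- ===== SOURCE A (Python) =====
-- def find_heredoc_marker_outside_quotes(s: str) -> bool:
--     """
--     Detects `<<` outside quotes. Conservative: if it appears, skip rewriting.
--     """
--     quote: str | None = None
--     i = 0
--     while i < len(s) - 1:
--         ch = s[i]
--         if ch == "\\" and quote != "'":
--             i += 2
--             continue
--         if ch in ("'", '"'):
--             if quote is None:
--                 quote = ch
--             elif quote == ch:
--                 quote = None
--             i += 1
--             continue
--         if quote is None and s[i : i + 2] == "<<":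
--             return True
--         i += 1
--     return False
-- ===== SOURCE B (Python) =====
-- def find_heredoc_marker_outside_quotes(s: str) -> bool:
--     """Single pass over characters with escape/quote/previous-'<' flags."""
--     quote = None
--     escaped = False
--     prev_lt = False
--     for ch in s:
--         if escaped:
--             escaped = False
--             prev_lt = False
--             continue
--         if ch == "\\" and quote != "'":
--             escaped = True
--             prev_lt = False
--             continue
--         if ch in ("'", '"'):
--             if quote is None:
--                 quote = ch
--             elif quote == ch:
--                 quote = None
--             prev_lt = False
--             continue
--         if quote is None and ch == "<":
--             if prev_lt:
--                 return True
--             prev_lt = True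
--         else:
--             prev_lt = False
--     return False
-- ===== Notes on version B (the rewrite author's own statement) =====
-- stated objective: idiomatic
-- what changed: Replaced the index-based while loop with i += 2 skips and a two-character slice lookahead by a single for-each-character pass maintaining three flags (current quote, escaped, previous-char-was-'<').
import Mathlib
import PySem

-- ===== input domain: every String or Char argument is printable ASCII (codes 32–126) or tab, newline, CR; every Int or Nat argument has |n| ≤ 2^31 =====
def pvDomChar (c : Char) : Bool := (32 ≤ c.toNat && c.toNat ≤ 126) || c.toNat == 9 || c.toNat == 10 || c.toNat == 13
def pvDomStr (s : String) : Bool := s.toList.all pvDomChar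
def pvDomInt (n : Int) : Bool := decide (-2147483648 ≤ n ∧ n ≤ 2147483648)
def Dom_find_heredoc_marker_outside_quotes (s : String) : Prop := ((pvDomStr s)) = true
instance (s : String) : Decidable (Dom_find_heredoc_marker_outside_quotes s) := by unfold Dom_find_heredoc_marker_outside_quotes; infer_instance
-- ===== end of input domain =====

-- ===== PORT A =====
-- B is a plainer single-pass decomposition of A (flags instead of index arithmetic); objective: idiomatic.
-- A's while loop over index i (running while i < len(s)-1, with the escape case doing i += 2)
-- ported as structural recursion on the suffix of s.toList starting at i; s[i:i+2] == "<<"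
-- becomes matching the first two characters of the suffix.
def pvALoop : List Char → Option Char → Bool
  | c1 :: c2 :: rest, quote =>
    if c1 = '\\' ∧ quote ≠ some '\'' then
      pvALoop rest quote                     -- i += 2
    else if c1 = '\'' ∨ c1 = '"' then
      pvALoop (c2 :: rest)
        (if quote = none then some c1 else if quote = some c1 then none else quote)
    else if quote = none ∧ c1 = '<' ∧ c2 = '<' then
      true
    else
      pvALoop (c2 :: rest) quote
  | _, _ => false                            -- i ≥ len(s) - 1

def find_heredoc_marker_outside_quotes (s : String) : Bool :=
  pvALoop s.toList none

-- ===== PORT B =====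
-- B's for-ch loop with state (quote, escaped, prev_lt) and early return, as recursion on the char list.
def pvBLoop : List Char → Option Char → Bool → Bool → Bool
  | [], _, _, _ => false
  | c :: rest, quote, escaped, prev_lt =>
    if escaped then
      pvBLoop rest quote false false
    else if c = '\\' ∧ quote ≠ some '\'' then
      pvBLoop rest quote true false
    else if c = '\'' ∨ c = '"' then
      pvBLoop rest
        (if quote = none then some c else if quote = some c then none else quote)
        false false
    else if quote = none ∧ c = '<' then
      if prev_lt then true else pvBLoop rest quote false true
    else
      pvBLoop rest quote false false

def find_heredoc_marker_outside_quotes_alt (s : String) : Bool :=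
  pvBLoop s.toList none false false

-- ===== PRECONDITION & SPEC =====
def Spec_find_heredoc_marker_outside_quotes (s : String) (out : Bool) : Prop := out = find_heredoc_marker_outside_quotes_alt s
instance (s : String) (out : Bool) : Decidable (Spec_find_heredoc_marker_outside_quotes s out) := by unfold Spec_find_heredoc_marker_outside_quotes; infer_instance

-- ===== CLAIM (what is proved, stated in full; the proofs are below) =====
def Claim_equal_find_heredoc_marker_outside_quotes : Prop := ∀ (s : String), Dom_find_heredoc_marker_outside_quotes s → Spec_find_heredoc_marker_outside_quotes s (find_heredoc_marker_outside_quotes s)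

-- ===== LEMMAS AND PROOFS =====

-- prev_lt only matters when the next character is '<' outside quotes
theorem pvBLoop_prev_irrel (rest : List Char) (c : Char) (q : Option Char)
    (h : ¬ (q = none ∧ c = '<')) :
    pvBLoop (c :: rest) q false true = pvBLoop (c :: rest) q false false := by
  simp only [pvBLoop]
  split_ifs <;> simp_all

theorem pvLoop_agree : ∀ (n : ℕ) (l : List Char) (q : Option Char), l.length ≤ n →
    pvALoop l q = pvBLoop l q false false := by
  intro n
  induction n with
  | zero =>
    intro l q h
    have : l = [] := List.length_eq_zero_iff.mp (Nat.le_zero.mp h)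
    subst this; rfl
  | succ n ih =>
    intro l q h
    match l with
    | [] => rfl
    | [c] =>
      simp only [pvALoop, pvBLoop]
      split_ifs <;> rfl
    | c1 :: c2 :: rest =>
      simp only [List.length_cons] at h
      by_cases h1 : c1 = '\\' ∧ q ≠ some '\''
      · -- escape: A skips two, B consumes c1 then swallows c2 via the escaped flag
        rw [show pvALoop (c1 :: c2 :: rest) q = pvALoop rest q by
              simp only [pvALoop]; rw [if_pos h1],
            show pvBLoop (c1 :: c2 :: rest) q false false = pvBLoop rest q false false by
              simp only [pvBLoop]; rw [if_neg (by simp), if_pos h1]; simp]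
        exact ih rest q (by omega)
      · by_cases h2 : c1 = '\'' ∨ c1 = '"'
        · rw [show pvALoop (c1 :: c2 :: rest) q =
                pvALoop (c2 :: rest) (if q = none then some c1 else if q = some c1 then none else q) by
                simp only [pvALoop]; rw [if_neg h1, if_pos h2],
              show pvBLoop (c1 :: c2 :: rest) q false false =
                pvBLoop (c2 :: rest) (if q = none then some c1 else if q = some c1 then none else q) false false by
                simp only [pvBLoop]; rw [if_neg (by simp), if_neg h1, if_pos h2]]
          exact ih _ _ (by simp only [List.length_cons]; omega)
        · by_cases h3 : q = none ∧ c1 = '<'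
          · by_cases h4 : c2 = '<'
            · -- both detect "<<"
              obtain ⟨hq, hc⟩ := h3
              subst hq; subst hc; subst h4
              rfl
            · -- c1 = '<' but c2 ≠ '<': A steps; B sets prev_lt, which is then irrelevant
              rw [show pvALoop (c1 :: c2 :: rest) q = pvALoop (c2 :: rest) q by
                    simp only [pvALoop]; rw [if_neg h1, if_neg h2, if_neg (by tauto)],
                  show pvBLoop (c1 :: c2 :: rest) q false false = pvBLoop (c2 :: rest) q false true by
                    simp only [pvBLoop]; rw [if_neg (by simp), if_neg h1, if_neg h2, if_pos h3]; rfl,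
                  pvBLoop_prev_irrel _ _ _ (by tauto)]
              exact ih _ _ (by simp only [List.length_cons]; omega)
          · rw [show pvALoop (c1 :: c2 :: rest) q = pvALoop (c2 :: rest) q by
                  simp only [pvALoop]; rw [if_neg h1, if_neg h2, if_neg (by tauto)],
                show pvBLoop (c1 :: c2 :: rest) q false false = pvBLoop (c2 :: rest) q false false by
                  simp only [pvBLoop]; rw [if_neg (by simp), if_neg h1, if_neg h2, if_neg h3]]
            exact ih _ _ (by simp only [List.length_cons]; omega)

-- ===== VERDICT (by name: the statement is the Claim_ definition above) =====
theorem find_heredoc_marker_outside_quotes_spec : Claim_equal_find_heredoc_marker_outside_quotes := by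
  intro s _
  unfold Spec_find_heredoc_marker_outside_quotes find_heredoc_marker_outside_quotes find_heredoc_marker_outside_quotes_alt
  exact pvLoop_agree s.toList.length s.toList none le_rfl
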